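-- pv_equiv track=rewrite | github.com/AlaaMahi/HackerRank | generate_vec_binary.py | generate_vec_binary
-- ===== SOURCE A (Python) =====
-- def generate_vec_binary(n, m):
--     res = []
--     lower = sum(2**i for i in range(m-4))
--     upper = sum(2**i for i in range(m-4, m))+1
--     for i in range(lower, upper):
--         val = bin(i)[2:].zfill(8)
--         if sum([int(i) for i in val]) == 4:
--             res.append(val)
--     return res
-- ===== SOURCE B (Python) =====
-- def generate_vec_binary(n, m):
--     lower = (1 << (m - 4)) - 1
--     upper = (1 << m) - (1 << (m - 4)) + 1
--
--     def enum(k, t):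
--         # increasing list of all integers < 2**t with exactly k set bits
--         if k == 0:
--             return [0]
--         out = []
--         for d in range(k - 1, t):
--             for v in enum(k - 1, d):
--                 out.append((1 << d) + v)
--         return out
--
--     return [bin(v)[2:].zfill(8) for v in enum(4, m) if lower <= v < upper]
-- ===== Notes on version B (the rewrite author's own statement) =====
-- stated objective: faster
-- what changed: A scans every integer in [2^(m-4)-1, 2^m-2^(m-4)] and tests each one's binary digit sum; B generates only the popcount-4 integers in increasing order by a recursive choose-the-top-bit enumeration and filters them to the range — intended as faster (O(m^4) vs O(2^m)); a timing run read B 1172x faster at the largest size both finished (A timed out on the larger inputs) but marked that single measurement as unconfirmed.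
import Mathlib
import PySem

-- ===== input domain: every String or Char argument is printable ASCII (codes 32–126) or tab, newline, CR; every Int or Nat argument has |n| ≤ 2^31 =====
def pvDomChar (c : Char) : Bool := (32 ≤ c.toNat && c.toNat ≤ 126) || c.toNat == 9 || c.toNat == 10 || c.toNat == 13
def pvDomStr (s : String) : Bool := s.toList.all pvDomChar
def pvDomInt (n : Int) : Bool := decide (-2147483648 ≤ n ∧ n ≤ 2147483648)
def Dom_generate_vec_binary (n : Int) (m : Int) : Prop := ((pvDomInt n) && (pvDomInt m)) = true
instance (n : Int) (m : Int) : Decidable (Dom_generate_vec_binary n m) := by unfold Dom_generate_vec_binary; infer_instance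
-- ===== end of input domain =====

-- B replaces A's scan of the whole integer range [2^(m-4)-1, 2^m-2^(m-4)] by a recursive
-- combinatorial generator that emits only the popcount-4 numbers, in increasing order
-- (objective: intended as faster; a timing run read B 1172x faster at the largest size
-- both finished, but A timed out on larger inputs so the probe marked it unconfirmed).

-- ===== PORT A =====

-- bin(v)[2:] for v ≥ 0, most significant digit first (exact: Python's bin without the '0b' prefix)
def pvBinAux (v : Nat) (acc : List Char) : List Char :=
  if v = 0 then acc
  else pvBinAux (v / 2) ((if v % 2 = 1 then '1' else '0') :: acc)
decreasing_by exact Nat.div_lt_self (Nat.pos_of_ne_zero (by assumption)) (by omega)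

def pvBinChars (v : Nat) : List Char := if v = 0 then ['0'] else pvBinAux v []

-- s.zfill(8) on a nonempty digit string (exact: pad on the left with '0' to length 8)
def pvZfill8 (l : List Char) : List Char := List.replicate (8 - l.length) '0' ++ l

-- port of A; 2**i is ported as 2 ^ i.toNat and bin(i) as pvBinChars i.toNat, exact because
-- under Pre_ (4 ≤ m) every i these meet is ≥ 0; int(c) on a binary digit char is c.toNat - 48
def generate_vec_binary (n : Int) (m : Int) : List String :=
  let lower : Int := (PySem.List.pyRange 0 (m - 4)).foldl (fun acc i => acc + 2 ^ i.toNat) 0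
  let upper : Int := (PySem.List.pyRange (m - 4) m).foldl (fun acc i => acc + 2 ^ i.toNat) 0 + 1
  (PySem.List.pyRange lower upper).foldl (fun res i =>
    let val := pvZfill8 (pvBinChars i.toNat)
    if (val.map (fun c => (c.toNat : Int) - 48)).sum = 4 then res ++ [String.mk val] else res) []

-- ===== PORT B =====

-- Source B's enum(k, t): list of all integers < 2**t with exactly k set bits, built recursively;
-- range(k-1, t) is List.range' (k-1) (t-(k-1))
def pvEnum : Nat → Nat → List Nat
  | 0, _ => [0]
  | k + 1, t =>
      (List.range' k (t - k)).foldl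
        (fun out d => out ++ (pvEnum k d).map (fun v => 2 ^ d + v)) []

-- bin(v)[2:].zfill(8)
def pvFmt (v : Nat) : String := String.mk (pvZfill8 (pvBinChars v))

-- port of B; (1 << (m-4)) and (1 << m) are ported as 2 ^ (m-4).toNat and 2 ^ m.toNat,
-- exact under Pre_ (4 ≤ m)
def generate_vec_binary_alt (n : Int) (m : Int) : List String :=
  let lower : Int := 2 ^ (m - 4).toNat - 1
  let upper : Int := 2 ^ m.toNat - 2 ^ (m - 4).toNat + 1
  ((pvEnum 4 m.toNat).filter
      (fun v : Nat => decide (lower ≤ (v : Int)) && decide ((v : Int) < upper))).map pvFmt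

-- ===== PRECONDITION & SPEC =====
-- Pre_ excludes exactly m < 4, where A raises TypeError: range(m-4, m) then contains a
-- negative i, so sum(2**i ...) is a float and range() rejects the float bound.
def Pre_generate_vec_binary (n : Int) (m : Int) : Prop := 4 ≤ m
instance (n : Int) (m : Int) : Decidable (Pre_generate_vec_binary n m) := by
  unfold Pre_generate_vec_binary; infer_instance

def pvWitness_generate_vec_binary : Int × Int := (0, 5)

def Spec_generate_vec_binary (n : Int) (m : Int) (out : List String) : Prop := out = generate_vec_binary_alt n m
instance (n : Int) (m : Int) (out : List String) : Decidable (Spec_generate_vec_binary n m out) := by unfold Spec_generate_vec_binary; infer_instance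

-- ===== CLAIM (what is proved, stated in full; the proofs are below) =====
def Claim_equal_generate_vec_binary : Prop := ∀ (n : Int) (m : Int), Dom_generate_vec_binary n m → Pre_generate_vec_binary n m → Spec_generate_vec_binary n m (generate_vec_binary n m)

-- ===== LEMMAS AND PROOFS =====

def pvPc (v : Nat) : Nat :=
  if v = 0 then 0 else pvPc (v / 2) + v % 2
decreasing_by exact Nat.div_lt_self (Nat.pos_of_ne_zero (by assumption)) (by omega)
theorem pvPc_zero : pvPc 0 = 0 := by simp [pvPc]
theorem pvPc_eq (v : Nat) : pvPc v = pvPc (v / 2) + v % 2 := by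
  by_cases h : v = 0
  · subst h; simp [pvPc]
  · rw [pvPc]; simp [h]
theorem pvPc_pos (v : Nat) (hv : 0 < v) : 0 < pvPc v := by
  induction v using Nat.strong_induction_on with
  | _ v ih =>
    rw [pvPc_eq]
    by_cases hodd : v % 2 = 1
    · omega
    · have : 0 < pvPc (v / 2) := ih (v / 2) (by omega) (by omega)
      omega
theorem pvPc_le (t : Nat) : ∀ v, v < 2 ^ t → pvPc v ≤ t := by
  induction t with
  | zero => intro v hv; have : v = 0 := by omega
            subst this; simp [pvPc_zero]
  | succ t ih =>
    intro v hv
    rw [pvPc_eq]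
    have := ih (v / 2) (by rw [pow_succ] at hv; omega)
    omega
theorem pvPc_add_pow (t : Nat) : ∀ v, v < 2 ^ t → pvPc (2 ^ t + v) = pvPc v + 1 := by
  induction t with
  | zero => intro v hv; have : v = 0 := by omega
            subst this
            rw [pvPc_eq]; norm_num [pvPc_zero]
  | succ t ih =>
    intro v hv
    have h2 : 0 < 2 ^ t := Nat.two_pow_pos t
    rw [pvPc_eq, pvPc_eq v]
    have hdiv : (2 ^ (t + 1) + v) / 2 = 2 ^ t + v / 2 := by
      rw [pow_succ]; omega
    have hmod : (2 ^ (t + 1) + v) % 2 = v % 2 := by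
      rw [pow_succ]; omega
    rw [hdiv, hmod, ih (v / 2) (by rw [pow_succ] at hv; omega)]
    omega
theorem pvEnum_eq (t : Nat) : ∀ k : Nat,
    pvEnum k t = (List.range (2 ^ t)).filter (fun v => decide (pvPc v = k)) := by
  induction t with
  | zero =>
    intro k
    cases k with
    | zero => simp [pvEnum, List.range_succ, pvPc_zero]
    | succ k => simp [pvEnum, List.range_succ, pvPc_zero]
  | succ t ih =>
    intro k
    cases k with
    | zero =>
      rw [pvEnum]
      have h1 : (1 : Nat) ≤ 2 ^ (t + 1) := Nat.one_le_two_pow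
      rw [show (2 : Nat) ^ (t + 1) = 1 + (2 ^ (t + 1) - 1) by omega]
      rw [List.range_add, List.filter_append]
      have hl : (List.range 1).filter (fun v => decide (pvPc v = 0)) = [0] := by
        simp [List.range_succ, pvPc_zero]
      have hr : ((List.range (2 ^ (t + 1) - 1)).map (fun x => 1 + x)).filter
          (fun v => decide (pvPc v = 0)) = [] := by
        rw [List.filter_eq_nil_iff]
        intro v hv
        simp only [List.mem_map] at hv
        obtain ⟨x, _, rfl⟩ := hv
        have := pvPc_pos (1 + x) (by omega)
        simp only [decide_eq_true_eq]
        omega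
      rw [hl, hr]
      simp
    | succ k =>
      rw [pvEnum, PySem.List.foldl_append_eq_flatMap]
      rcases Nat.lt_or_ge t k with hlt | hge
      · have hz : t + 1 - k = 0 := by omega
        rw [hz]
        simp only [List.range'_zero, List.flatMap_nil, List.nil_append]
        symm
        rw [List.filter_eq_nil_iff]
        intro v hv
        simp only [List.mem_range] at hv
        have := pvPc_le (t + 1) v hv
        simp only [decide_eq_true_eq]
        omega
      · have hsplit : t + 1 - k = (t - k) + 1 := by omega
        rw [hsplit, List.range'_1_concat, List.flatMap_append]
        have hlast : k + (t - k) = t := by omega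
        rw [hlast]
        simp only [List.flatMap_cons, List.flatMap_nil, List.append_nil, List.nil_append]
        have ihk1 : (List.range' k (t - k)).flatMap
            (fun d => (pvEnum k d).map (fun v => 2 ^ d + v))
              = (List.range (2 ^ t)).filter (fun v => decide (pvPc v = k + 1)) := by
          have h := ih (k + 1)
          rw [pvEnum, PySem.List.foldl_append_eq_flatMap] at h
          simpa using h
        rw [ihk1, ih k]
        rw [show (2 : Nat) ^ (t + 1) = 2 ^ t + 2 ^ t by ring, List.range_add, List.filter_append]
        congr 1
        rw [List.filter_map]
        congr 1
        apply List.filter_congr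
        intro v hv
        simp only [List.mem_range] at hv
        simp only [Function.comp_apply, decide_eq_decide]
        rw [pvPc_add_pow t v hv]
        omega

theorem pyRange_eq_map (a : Int) (k : Nat) :
    PySem.List.pyRange a (a + (k : Int)) = (List.range k).map (fun j : Nat => a + (j : Int)) := by
  induction k with
  | zero => simp [pysem]
  | succ k ih =>
    push_cast
    rw [show a + ((k : Int) + 1) = (a + k) + 1 by ring,
        PySem.List.pyRange_one_succ_right (by omega), List.range_succ, ih]
    simp

theorem filter_range_interval (p : Nat → Bool) (lo hi N : Nat) (hlo : lo ≤ hi) (hhi : hi ≤ N) :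
    ((List.range N).filter p).filter (fun v => decide (lo ≤ v) && decide (v < hi))
      = (List.range' lo (hi - lo)).filter p := by
  rw [List.range_eq_range']
  rw [show N = lo + ((hi - lo) + (N - hi)) by omega]
  rw [← List.range'_append_1 (s := 0), List.filter_append, List.filter_append]
  simp only [Nat.zero_add]
  rw [← List.range'_append_1 (s := lo), List.filter_append, List.filter_append]
  have h1 : ((List.range' 0 lo).filter p).filter (fun v => decide (lo ≤ v) && decide (v < hi)) = [] := by
    rw [List.filter_eq_nil_iff]
    intro v hv
    have := List.mem_range'_1.mp (List.mem_of_mem_filter hv)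
    simp only [Bool.and_eq_true, decide_eq_true_eq, not_and]
    omega
  have h3 : ((List.range' (lo + (hi - lo)) (N - hi)).filter p).filter
      (fun v => decide (lo ≤ v) && decide (v < hi)) = [] := by
    rw [List.filter_eq_nil_iff]
    intro v hv
    have := List.mem_range'_1.mp (List.mem_of_mem_filter hv)
    simp only [Bool.and_eq_true, decide_eq_true_eq, not_and]
    omega
  have h2 : ((List.range' lo (hi - lo)).filter p).filter
      (fun v => decide (lo ≤ v) && decide (v < hi)) = (List.range' lo (hi - lo)).filter p := by
    rw [List.filter_eq_self]
    intro v hv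
    have := List.mem_range'_1.mp (List.mem_of_mem_filter hv)
    simp only [Bool.and_eq_true, decide_eq_true_eq]
    omega
  rw [h1, h2, h3]
  simp


theorem pvBinAux_sum (v : Nat) : ∀ acc : List Char,
    ((pvBinAux v acc).map (fun c => (c.toNat : Int) - 48)).sum
      = (pvPc v : Int) + ((acc.map (fun c => (c.toNat : Int) - 48)).sum) := by
  induction v using Nat.strong_induction_on with
  | _ v ih =>
    intro acc
    by_cases h : v = 0
    · subst h; simp [pvBinAux, pvPc_zero]
    · rw [pvBinAux]; simp only [h, if_false]
      rw [ih (v / 2) (Nat.div_lt_self (Nat.pos_of_ne_zero h) (by omega))]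
      rw [pvPc_eq v]
      by_cases hm : v % 2 = 1 <;> simp [hm] <;> push_cast <;> omega

theorem digitSum_eq_pc (v : Nat) :
    ((pvZfill8 (pvBinChars v)).map (fun c => (c.toNat : Int) - 48)).sum = (pvPc v : Int) := by
  unfold pvZfill8 pvBinChars
  by_cases h : v = 0
  · subst h
    simp [pvPc_zero, List.map_replicate]
  · simp only [h, if_false, List.map_append, List.sum_append, List.map_replicate]
    rw [pvBinAux_sum]
    simp [List.sum_replicate]

theorem sum_pow_range (s : Nat) :
    ((List.range s).map (fun j : Nat => (2 : Int) ^ j)).sum = 2 ^ s - 1 := by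
  induction s with
  | zero => simp
  | succ s ih =>
    rw [List.range_succ]
    simp [ih]
    ring

theorem lowerA_eq (m : Int) (hm : 4 ≤ m) :
    (PySem.List.pyRange 0 (m - 4)).foldl (fun acc i => acc + 2 ^ i.toNat) 0
      = ((2 : Int) ^ (m - 4).toNat - 1) := by
  rw [PySem.List.foldl_add (g := fun i : Int => (2 : Int) ^ i.toNat)]
  have h0 : PySem.List.pyRange 0 (m - 4)
      = (List.range (m - 4).toNat).map (fun j : Nat => (0 : Int) + (j : Int)) := by
    rw [← pyRange_eq_map]; congr 1; omega
  rw [h0, List.map_map]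
  rw [List.map_congr_left (g := fun j : Nat => (2 : Int) ^ j)
        (fun j _ => by simp)]
  rw [sum_pow_range]
  ring

theorem upperA_eq (m : Int) (hm : 4 ≤ m) :
    (PySem.List.pyRange (m - 4) m).foldl (fun acc i => acc + 2 ^ i.toNat) 0
      = ((2 : Int) ^ m.toNat - (2 : Int) ^ (m - 4).toNat) := by
  rw [PySem.List.foldl_add (g := fun i : Int => (2 : Int) ^ i.toNat)]
  have h0 : PySem.List.pyRange (m - 4) m
      = (List.range 4).map (fun j : Nat => (m - 4) + (j : Int)) := by
    rw [← pyRange_eq_map]; congr 1; omega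
  rw [h0, List.map_map]
  rw [List.map_congr_left (g := fun j : Nat => (2 : Int) ^ ((m - 4).toNat + j))
        (fun j _ => by simp only [Function.comp_apply]; congr 1; omega)]
  have hM : m.toNat = (m - 4).toNat + 4 := by omega
  rw [hM]
  simp [List.range_succ, pow_add]
  ring

-- ===== VERDICT (by name: the statement is the Claim_ definition above) =====
theorem generate_vec_binary_spec : Claim_equal_generate_vec_binary := by
  intro n m _ hm
  unfold Pre_generate_vec_binary at hm
  unfold Spec_generate_vec_binary
  unfold generate_vec_binary generate_vec_binary_alt
  simp only [lowerA_eq m hm, upperA_eq m hm]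
  have hc1 : ((2 : Int) ^ (m - 4).toNat) = ((2 ^ (m - 4).toNat : Nat) : Int) := by push_cast; ring
  have hc2 : ((2 : Int) ^ m.toNat) = ((2 ^ m.toNat : Nat) : Int) := by push_cast; ring
  rw [hc1, hc2]
  have hM : m.toNat = (m - 4).toNat + 4 := by omega
  have hu1 : (1 : Nat) ≤ 2 ^ (m - 4).toNat := Nat.one_le_two_pow
  have huw : 2 ^ (m - 4).toNat * 16 = 2 ^ m.toNat := by
    rw [hM, pow_add]; norm_num
  generalize hu : (2 : Nat) ^ (m - 4).toNat = u at *
  generalize hw : (2 : Nat) ^ m.toNat = w at *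
  have hr : PySem.List.pyRange ((u : Int) - 1) ((w : Int) - u + 1)
      = (List.range ((w - u + 1) - (u - 1))).map (fun j : Nat => ((u : Int) - 1) + (j : Int)) := by
    rw [← pyRange_eq_map]; congr 1; push_cast; omega
  rw [hr, List.foldl_map]
  rw [PySem.List.foldl_append_ite
        (p := fun j : Nat =>
          ((pvZfill8 (pvBinChars (((u : Int) - 1 + (j : Int)).toNat))).map
            (fun c => (c.toNat : Int) - 48)).sum = 4)
        (f := fun j : Nat => String.mk (pvZfill8 (pvBinChars (((u : Int) - 1 + (j : Int)).toNat))))]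
  have key : ∀ j : Nat, (((u : Int) - 1 + (j : Int))).toNat = u - 1 + j := by intro j; omega
  rw [List.nil_append]
  -- A side: the test counts set bits, the appended value is pvFmt
  rw [List.filter_congr (q := fun j : Nat => decide (pvPc (u - 1 + j) = 4))
        (by intro j _
            rw [decide_eq_decide, key j, digitSum_eq_pc]
            omega)]
  rw [List.map_congr_left (g := fun j : Nat => pvFmt (u - 1 + j))
        (by intro j _
            simp only [pvFmt, key j])]
  -- B side
  rw [pvEnum_eq m.toNat 4, hw]
  rw [List.filter_congr
        (p := fun v : Nat => decide ((u : Int) - 1 ≤ (v : Int)) && decide ((v : Int) < (w : Int) - (u : Int) + 1))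
        (q := fun v : Nat => decide (u - 1 ≤ v) && decide (v < w - u + 1))
        (by intro v _
            beta_reduce
            congr 1
            · rw [decide_eq_decide]; omega
            · rw [decide_eq_decide]; omega)]
  rw [filter_range_interval _ (u - 1) (w - u + 1) w (by omega) (by omega)]
  rw [List.range'_eq_map_range, List.filter_map, List.map_map]
  simp only [Function.comp_def]
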